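-- pv_equiv track=rewrite | github.com/hmyunis/text-to-sql-system | hf_app/app.py | format_schema_like_training
-- ===== SOURCE A (Python) =====
-- def format_schema_like_training(raw_column_list):
--     """
--     Transforms ['api_customer.name', 'api_customer.city', 'api_order.id']
--     Into: "api_customer: name, city | api_order: id"
--
--     This matches the pattern the model saw during training.
--     """
--     schema_map = {}
--     for item in raw_column_list:
--         if "." in item:
--             table, col = item.split('.', 1)
--             if table not in schema_map:
--                 schema_map[table] = []
--             schema_map[table].append(col)
--
--     # Join nicely
--     parts = [f"{table}: {', '.join(cols)}" for table, cols in schema_map.items()]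
--     return " | ".join(parts)
-- ===== SOURCE B (Python) =====
-- def format_schema_like_training(raw_column_list):
--     # Two-pass decomposition: first build the ordered list of distinct table
--     # names, then rescan the input once per table to collect its columns.
--     tables = []
--     for item in raw_column_list:
--         if "." in item:
--             t, _rest = item.split('.', 1)
--             if t not in tables:
--                 tables.append(t)
--     parts = [
--         t + ": " + ", ".join(
--             item.split('.', 1)[1]
--             for item in raw_column_list
--             if "." in item and item.split('.', 1)[0] == t
--         )
--         for t in tables
--     ]
--     return " | ".join(parts)
-- ===== Notes on version B (the rewrite author's own statement) =====
-- stated objective: alternative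
-- what changed: Replaces the single dict-grouping pass with an index-build-then-rescan shape: one pass collects the ordered distinct table names, then each table rescans the list to collect its columns; no dict is used.
import Mathlib
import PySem

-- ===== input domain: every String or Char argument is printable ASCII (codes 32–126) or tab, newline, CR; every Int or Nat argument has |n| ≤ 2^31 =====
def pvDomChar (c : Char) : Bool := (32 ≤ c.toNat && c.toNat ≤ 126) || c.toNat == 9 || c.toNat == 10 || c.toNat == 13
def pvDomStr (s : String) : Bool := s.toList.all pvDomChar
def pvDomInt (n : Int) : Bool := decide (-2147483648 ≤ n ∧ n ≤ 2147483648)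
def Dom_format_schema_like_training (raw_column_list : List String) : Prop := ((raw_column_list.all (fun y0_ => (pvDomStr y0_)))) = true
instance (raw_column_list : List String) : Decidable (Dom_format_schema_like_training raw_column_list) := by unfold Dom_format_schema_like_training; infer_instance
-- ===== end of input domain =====

-- B re-implements A's single dict-grouping pass as an index-build-then-per-table-rescan (two-pass) shape; same value, no speed claim.

-- ===== PORT A =====
-- item.split('.', 1): the separator is non-empty, so PySem.Str.splitMax? is always `some`; `.getD []` only unwraps the option.
def pySplitDot (s : String) : List String := (PySem.Str.splitMax? s "." 1).getD []

def stepA (d : PySem.Dict String (List String)) (item : String) : PySem.Dict String (List String) :=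
  if PySem.Str.isIn "." item then
    match pySplitDot item with
    | table :: col :: _ =>
        -- if table not in schema_map: schema_map[table] = []
        let d1 := if d.contains table then d else d.insert table []
        -- schema_map[table].append(col)
        d1.insert table (d1.getD table [] ++ [col])
    | _ => d      -- unreachable: '.' in item gives at least two pieces
  else d

def format_schema_like_training (raw_column_list : List String) : String :=
  let schema_map := raw_column_list.foldl stepA PySem.Dict.empty
  let parts := schema_map.items.map (fun p => p.1 ++ ": " ++ PySem.Str.join ", " p.2)
  PySem.Str.join " | " parts

-- ===== PORT B =====
-- first pass: t, _rest = item.split('.', 1); if t not in tables: tables.append(t)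
def stepT (ts : List String) (item : String) : List String :=
  if PySem.Str.isIn "." item then
    match pySplitDot item with
    | t :: _ :: _ => if ts.contains t then ts else ts ++ [t]
    | _ => ts     -- unreachable
  else ts

def tablesB (raw_column_list : List String) : List String :=
  raw_column_list.foldl stepT []

-- rescan filter: "." in item and item.split('.', 1)[0] == t
def predB (t : String) (item : String) : Bool :=
  PySem.Str.isIn "." item &&
    (match pySplitDot item with
     | head :: _ => head == t
     | _ => false)

-- item.split('.', 1)[1]
def tailB (item : String) : String :=
  match pySplitDot item with
  | _ :: tail :: _ => tail
  | _ => ""         -- unreachable under predB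

def format_schema_like_training_alt (raw_column_list : List String) : String :=
  let parts := (tablesB raw_column_list).map (fun t =>
    t ++ ": " ++ PySem.Str.join ", " ((raw_column_list.filter (predB t)).map tailB))
  PySem.Str.join " | " parts

-- ===== PRECONDITION & SPEC =====
def Spec_format_schema_like_training (raw_column_list : List String) (out : String) : Prop := out = format_schema_like_training_alt raw_column_list
instance (raw_column_list : List String) (out : String) : Decidable (Spec_format_schema_like_training raw_column_list out) := by unfold Spec_format_schema_like_training; infer_instance

-- ===== CLAIM (what is proved, stated in full; the proofs are below) =====
def Claim_equal_format_schema_like_training : Prop := ∀ (raw_column_list : List String), Dom_format_schema_like_training raw_column_list → Spec_format_schema_like_training raw_column_list (format_schema_like_training raw_column_list)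

-- ===== LEMMAS AND PROOFS =====

-- canonical description shared by both proofs
def tc? (s : String) : Option (String × String) :=
  if PySem.Str.isIn "." s then
    match pySplitDot s with
    | t :: c :: _ => some (t, c)
    | _ => none
  else none

def tabs (xs : List String) : List String := (xs.filterMap tc?).map Prod.fst

def cols (xs : List String) (t : String) : List String :=
  ((xs.filterMap tc?).filter (fun p => p.1 == t)).map Prod.snd

def fresh (ks : List String) : List String → List String
  | [] => []
  | t :: ts => if t ∈ ks then fresh ks ts else t :: fresh (t :: ks) ts

-- shape of split('.', 1) when '.' occurs
lemma go_m0 (sep : List Char) (fuel : Nat) (l cur : List Char) (acc : List (List Char)) :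
    PySem.Chars.splitOnMax.go sep fuel 0 l cur acc = ((cur.reverse ++ l) :: acc).reverse := by
  cases fuel with
  | zero => rfl
  | succ n => cases l <;> simp [PySem.Chars.splitOnMax.go]

lemma go_shape (fuel : Nat) : ∀ (l cur : List Char) (acc : List (List Char)),
    l.length ≤ fuel → '.' ∈ l →
    ∃ x y, PySem.Chars.splitOnMax.go ['.'] fuel 1 l cur acc = acc.reverse ++ [x, y] := by
  induction fuel with
  | zero =>
    intro l cur acc hl hm
    have hnil : l = [] := List.eq_nil_of_length_eq_zero (Nat.le_zero.mp hl)
    subst hnil; simp at hm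
  | succ n ih =>
    intro l cur acc hl hm
    cases l with
    | nil => simp at hm
    | cons c rest =>
      by_cases hp : List.isPrefixOf ['.'] (c :: rest) = true
      · rw [show PySem.Chars.splitOnMax.go ['.'] (n+1) 1 (c :: rest) cur acc
            = PySem.Chars.splitOnMax.go ['.'] n 0 (List.drop 1 (c :: rest)) [] (cur.reverse :: acc) from by
            simp [PySem.Chars.splitOnMax.go, hp]]
        rw [go_m0]
        exact ⟨cur.reverse, List.drop 1 (c :: rest), by simp⟩
      · have hc : c ≠ '.' := by
          intro h; exact hp (by simp [List.isPrefixOf, h])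
        have hm' : '.' ∈ rest := by
          rcases List.mem_cons.mp hm with h | h
          · exact absurd h.symm hc
          · exact h
        rw [show PySem.Chars.splitOnMax.go ['.'] (n+1) 1 (c :: rest) cur acc
            = PySem.Chars.splitOnMax.go ['.'] n 1 rest (c :: cur) acc from by
            simp [PySem.Chars.splitOnMax.go, hp]]
        exact ih rest (c :: cur) acc (by simpa using Nat.lt_succ_iff.mp (by simpa using hl)) hm'

lemma pySplitDot_shape (s : String) (h : PySem.Chars.isIn ['.'] s.toList = true) :
    ∃ a b, pySplitDot s = [a, b] := by
  have hmem : '.' ∈ s.toList := ((PySem.Chars.isIn_iff_infix _ _).mp h).subset (by simp)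
  obtain ⟨x, y, hxy⟩ :=
    go_shape (s.toList.length + 1) s.toList [] [] (Nat.le_succ _) hmem
  have hxy' : PySem.Chars.splitOnMax s.toList ['.'] 1 = [x, y] := by
    rw [PySem.Chars.splitOnMax]
    simpa using hxy
  refine ⟨String.ofList x, String.ofList y, ?_⟩
  simp [pySplitDot, PySem.Str.splitMax?, PySem.Chars.splitMax?, hxy']

lemma tc?_none {s : String} (h : PySem.Chars.isIn ['.'] s.toList = false) : tc? s = none := by
  simp [tc?, h]

lemma tc?_some {s a b : String} (h : PySem.Chars.isIn ['.'] s.toList = true)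
    (hab : pySplitDot s = [a, b]) : tc? s = some (a, b) := by
  simp [tc?, h, hab]

lemma tabs_cons_none {x : String} (h : tc? x = none) (xs : List String) :
    tabs (x :: xs) = tabs xs := by simp [tabs, h]

lemma tabs_cons_some {x a b : String} (h : tc? x = some (a, b)) (xs : List String) :
    tabs (x :: xs) = a :: tabs xs := by simp [tabs, h]

lemma cols_cons_none {x : String} (h : tc? x = none) (xs : List String) :
    cols (x :: xs) = cols xs := by
  funext t; simp [cols, h]

lemma cols_cons_some {x a b : String} (h : tc? x = some (a, b)) (xs : List String) :
    cols (x :: xs) = fun t => (if a == t then [b] else []) ++ cols xs t := by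
  funext t
  by_cases hat : (a == t) = true <;> simp [cols, h, hat]

lemma fresh_congr {ks ks' : List String} (l : List String)
    (h : ∀ a, a ∈ ks ↔ a ∈ ks') : fresh ks l = fresh ks' l := by
  induction l generalizing ks ks' with
  | nil => rfl
  | cons t ts ih =>
    by_cases ht : t ∈ ks
    · rw [fresh, fresh, if_pos ht, if_pos ((h t).mp ht)]
      exact ih h
    · rw [fresh, fresh, if_neg ht, if_neg (fun hc => ht ((h t).mpr hc))]
      exact congrArg (t :: ·) (ih (fun a => by simp [h a]))

lemma fresh_not_mem {l ks : List String} {a : String} (h : a ∈ fresh ks l) : a ∉ ks := by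
  induction l generalizing ks with
  | nil => simp [fresh] at h
  | cons t ts ih =>
    by_cases ht : t ∈ ks
    · rw [fresh, if_pos ht] at h; exact ih h
    · rw [fresh, if_neg ht] at h
      rcases List.mem_cons.mp h with h | h
      · exact h ▸ ht
      · intro hk; exact ih h (List.mem_cons_of_mem _ hk)

-- A's grouping dict, characterised
lemma itemsA (xs : List String) : ∀ (d : PySem.Dict String (List String)), d.keys.Nodup →
    (xs.foldl stepA d).items
      = d.items.map (fun p => (p.1, p.2 ++ cols xs p.1))
        ++ (fresh d.keys (tabs xs)).map (fun t => (t, cols xs t)) := by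
  induction xs with
  | nil => intro d hd; simp [cols, tabs, fresh]
  | cons x xs ih =>
    intro d hd
    rw [List.foldl_cons]
    cases h1 : PySem.Str.isIn "." x with
    | false =>
      have h1c : PySem.Chars.isIn ['.'] x.toList = false := by simpa using h1
      have hstep : stepA d x = d := by simp [stepA, h1c]
      rw [hstep, ih d hd, tabs_cons_none (tc?_none h1c), cols_cons_none (tc?_none h1c)]
    | true =>
      have h1c : PySem.Chars.isIn ['.'] x.toList = true := by simpa using h1
      obtain ⟨a, b, hab⟩ := pySplitDot_shape x h1c
      have htc := tc?_some h1c hab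
      have hcols : ∀ u, cols (x :: xs) u = (if a == u then [b] else []) ++ cols xs u :=
        fun u => congrFun (cols_cons_some htc xs) u
      have hcols_eq : ∀ u, a ≠ u → cols (x :: xs) u = cols xs u := fun u hne => by
        rw [hcols u]; simp [beq_eq_false_iff_ne.mpr hne]
      have hcols_self : cols (x :: xs) a = b :: cols xs a := by
        rw [hcols a]; simp
      rw [tabs_cons_some htc]
      cases hc : d.contains a with
      | true =>
        have hstep : stepA d x = d.insert a (d.getD a [] ++ [b]) := by
          simp [stepA, h1c, hab, hc]
        have hkeys := PySem.Dict.keys_insert_of_contains d (d.getD a [] ++ [b]) hc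
        have hnd : (d.insert a (d.getD a [] ++ [b])).keys.Nodup := hkeys ▸ hd
        have hmemk : a ∈ d.keys := (PySem.Dict.contains_iff_mem_keys d a).mp hc
        rw [hstep, ih _ hnd, hkeys, PySem.Dict.items_insert_of_contains d _ hc, List.map_map]
        have hfr : fresh d.keys (a :: tabs xs) = fresh d.keys (tabs xs) := by
          rw [fresh, if_pos hmemk]
        rw [hfr]
        congr 1
        · refine List.map_congr_left (fun p hp => ?_)
          by_cases hpa : p.1 = a
          · have hbeq : (p.1 == a) = true := beq_iff_eq.mpr hpa
            have hget : d.getD a [] = p.2 := by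
              refine PySem.Dict.getD_of_mem_items (d := d) ?_ hd []
              rw [← hpa]; exact hp
            simp [Function.comp, hget, hpa, hcols_self, List.append_assoc]
          · have hbeq : (p.1 == a) = false := beq_eq_false_iff_ne.mpr hpa
            simp [Function.comp, hbeq, hcols_eq p.1 (fun he => hpa he.symm)]
        · refine List.map_congr_left (fun u hu => ?_)
          rw [hcols_eq u (fun he => fresh_not_mem hu (he ▸ hmemk))]
      | false =>
        have hget1 : (d.insert a []).getD a [] = [] := by
          rw [PySem.Dict.getD_eq_get?_getD, PySem.Dict.get?_insert_self]; rfl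
        have hstep : stepA d x = (d.insert a []).insert a ([] ++ [b]) := by
          simp [stepA, h1c, hab, hc, hget1]
        have hnotkeys : a ∉ d.keys := fun hm => by
          rw [(PySem.Dict.contains_iff_mem_keys d a).mpr hm] at hc; exact absurd hc (by simp)
        have hne1 : ∀ p ∈ d.items, (p.1 == a) = false := fun p hp =>
          beq_eq_false_iff_ne.mpr (fun he => hnotkeys (he ▸ PySem.Dict.mem_keys_of_mem_items d hp))
        have hitems : ((d.insert a []).insert a ([] ++ [b])).items = d.items ++ [(a, [b])] := by
          rw [PySem.Dict.items_insert_of_contains _ _ (PySem.Dict.contains_insert_self d a []),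
              PySem.Dict.items_insert_of_not_contains d _ hc, List.map_append]
          congr 1
          · exact (List.map_congr_left (fun p hp => by simp [hne1 p hp])).trans (List.map_id _)
          · simp
        have hkeys : ((d.insert a []).insert a ([] ++ [b])).keys = d.keys ++ [a] := by
          rw [PySem.Dict.keys_insert_of_contains _ _ (PySem.Dict.contains_insert_self d a []),
              PySem.Dict.keys_insert_of_not_contains d _ hc]
        have hnd := PySem.Dict.nodup_keys_insert _ a ([] ++ [b])
          (PySem.Dict.nodup_keys_insert d a [] hd)
        rw [hstep, ih _ hnd, hkeys, hitems, List.map_append]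
        have hfr : fresh d.keys (a :: tabs xs) = a :: fresh (a :: d.keys) (tabs xs) := by
          rw [fresh, if_neg hnotkeys]
        have hfr2 : fresh (d.keys ++ [a]) (tabs xs) = fresh (a :: d.keys) (tabs xs) :=
          fresh_congr _ (fun u => by simp [or_comm])
        rw [hfr, hfr2, List.map_cons]
        have e1 : List.map (fun p => (p.1, p.2 ++ cols (x :: xs) p.1)) d.items
            = List.map (fun p => (p.1, p.2 ++ cols xs p.1)) d.items :=
          List.map_congr_left (fun p hp => by
            rw [hcols_eq p.1 (fun he => (beq_eq_false_iff_ne.mp (hne1 p hp)) he.symm)])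
        have e2 : List.map (fun u => (u, cols (x :: xs) u)) (fresh (a :: d.keys) (tabs xs))
            = List.map (fun u => (u, cols xs u)) (fresh (a :: d.keys) (tabs xs)) :=
          List.map_congr_left (fun u hu => by
            rw [hcols_eq u (fun he => fresh_not_mem hu (he ▸ List.mem_cons_self))])
        rw [e1, List.map_cons, e2, hcols_self]
        simp

-- B's first pass builds exactly `fresh`
lemma tablesB_gen (xs : List String) : ∀ (ts : List String),
    xs.foldl stepT ts = ts ++ fresh ts (tabs xs) := by
  induction xs with
  | nil => intro ts; simp [tabs, fresh]
  | cons x xs ih =>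
    intro ts
    rw [List.foldl_cons]
    cases h1 : PySem.Str.isIn "." x with
    | false =>
      have h1c : PySem.Chars.isIn ['.'] x.toList = false := by simpa using h1
      rw [show stepT ts x = ts from by simp [stepT, h1c], ih ts,
          tabs_cons_none (tc?_none h1c)]
    | true =>
      have h1c : PySem.Chars.isIn ['.'] x.toList = true := by simpa using h1
      obtain ⟨a, b, hab⟩ := pySplitDot_shape x h1c
      rw [tabs_cons_some (tc?_some h1c hab)]
      have hstep : stepT ts x = if ts.contains a then ts else ts ++ [a] := by
        simp [stepT, h1c, hab]
      by_cases hm : a ∈ ts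
      · have hcont : ts.contains a = true := by simpa using hm
        rw [hstep, hcont, if_pos rfl, ih ts, fresh, if_pos hm]
      · have hcont : ts.contains a = false := by simpa using hm
        rw [hstep, hcont, if_neg (by simp), ih (ts ++ [a]), fresh, if_neg hm,
            fresh_congr (ks := ts ++ [a]) (ks' := a :: ts) (tabs xs) (fun u => by simp [or_comm])]
        simp

-- B's per-table rescan collects exactly `cols`
lemma colsB_eq (xs : List String) (t : String) :
    (xs.filter (predB t)).map tailB = cols xs t := by
  induction xs with
  | nil => simp [cols]
  | cons x xs ih =>
    cases h1 : PySem.Str.isIn "." x with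
    | false =>
      have h1c : PySem.Chars.isIn ['.'] x.toList = false := by simpa using h1
      have hpred : predB t x = false := by simp [predB, h1c]
      rw [cols_cons_none (tc?_none h1c), List.filter_cons, hpred]
      simpa using ih
    | true =>
      have h1c : PySem.Chars.isIn ['.'] x.toList = true := by simpa using h1
      obtain ⟨a, b, hab⟩ := pySplitDot_shape x h1c
      have hcols := congrFun (cols_cons_some (tc?_some h1c hab) xs) t
      have hpred : predB t x = (a == t) := by simp [predB, h1c, hab]
      have htail : tailB x = b := by simp [tailB, hab]
      rw [hcols, List.filter_cons, hpred]
      cases hat : (a == t) with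
      | true => simp [htail, ih]
      | false => simp [ih]

lemma A_canon (xs : List String) :
    format_schema_like_training xs
      = PySem.Str.join " | " ((fresh [] (tabs xs)).map
          (fun t => t ++ ": " ++ PySem.Str.join ", " (cols xs t))) := by
  have h := itemsA xs PySem.Dict.empty (by simp [PySem.Dict.empty, PySem.Dict.keys])
  simp only [PySem.Dict.empty, PySem.Dict.keys, List.map_nil, List.nil_append] at h
  simp [format_schema_like_training, PySem.Dict.empty, h, List.map_map, Function.comp_def]

lemma B_canon (xs : List String) :
    format_schema_like_training_alt xs
      = PySem.Str.join " | " ((fresh [] (tabs xs)).map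
          (fun t => t ++ ": " ++ PySem.Str.join ", " (cols xs t))) := by
  have h := tablesB_gen xs []
  simp only [format_schema_like_training_alt, tablesB, h, List.nil_append]
  congr 1
  exact List.map_congr_left (fun t _ => by rw [colsB_eq])

-- ===== VERDICT (by name: the statement is the Claim_ definition above) =====
theorem format_schema_like_training_spec : Claim_equal_format_schema_like_training := by
  intro xs _
  unfold Spec_format_schema_like_training
  rw [A_canon, B_canon]
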